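-- pv_equiv track=rewrite | github.com/kldtz/CharSplit | kirke/utils/strutils.py | find_previous_word
-- ===== SOURCE A (Python) =====
-- from typing import Pattern, Set, Tuple, Union
--
-- def find_previous_word(line: str, idx: int) -> Tuple[int, int, str]:
--     """Find previous word.
--
--     If the current index is an alphanum, it will get the previous word,
--     not the current one.
--     """
--     if idx < 0 or idx >= len(line):
--         return -1, -1, ''
--     found_space = False  # in the middle of a word
--     for i in range(idx, -1, -1):
--         ch = line[i]
--         if ch.isspace():
--             found_space = True  # found end of a word
--         elif ch.isalnum():
--             if not found_space:
--                 continue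
--             end_idx = i + 1
--             # go find the begin of a word
--             for j in range(i-1, -1, -1):
--                 ch2 = line[j]
--                 if ch2.isspace():
--                     return j+1, end_idx, line[j+1:end_idx]
--                 elif ch2.isalnum():
--                     continue
--                 else:  # punctuation or anything else
--                     return j+1, end_idx, line[j+1:end_idx]
--             # this can only be reached if j == -1
--             return 0, end_idx, line[0:end_idx]
--         else:
--             found_space = True  # any non-alphanum is a space
--     return -1, -1, ''
-- ===== SOURCE B (Python) =====
-- def find_previous_word(line, idx):
--     if idx < 0 or idx >= len(line):
--         return -1, -1, ''
--     # forward pass: collect all maximal alphanumeric runs as (start, end_exclusive)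
--     runs = []
--     start = None
--     for i, ch in enumerate(line):
--         if ch.isalnum():
--             if start is None:
--                 start = i
--         else:
--             if start is not None:
--                 runs.append((start, i))
--                 start = None
--     if start is not None:
--         runs.append((start, len(line)))
--     # the previous word is the rightmost run whose end lies at or before idx
--     best = None
--     for run in runs:
--         if run[1] <= idx:
--             best = run
--     if best is None:
--         return -1, -1, ''
--     return best[0], best[1], line[best[0]:best[1]]
-- ===== Notes on version B (the rewrite author's own statement) =====
-- stated objective: alternative
-- what changed: A scans backward from idx with a found_space flag and a nested backward inner scan to delimit the word; B does one forward pass collecting all maximal alphanumeric runs (start,end) and returns the rightmost run whose end lies at or before idx.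
import Mathlib
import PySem

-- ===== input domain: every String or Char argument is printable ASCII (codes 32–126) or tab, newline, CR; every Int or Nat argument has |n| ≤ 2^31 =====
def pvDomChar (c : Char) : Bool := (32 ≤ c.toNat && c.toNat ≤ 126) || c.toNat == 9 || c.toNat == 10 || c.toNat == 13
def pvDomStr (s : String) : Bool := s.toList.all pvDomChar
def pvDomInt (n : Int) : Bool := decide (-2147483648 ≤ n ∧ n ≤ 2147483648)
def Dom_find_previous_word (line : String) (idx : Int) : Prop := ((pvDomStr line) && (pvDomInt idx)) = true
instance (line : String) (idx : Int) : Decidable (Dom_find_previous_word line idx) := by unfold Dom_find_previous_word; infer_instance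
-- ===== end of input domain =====

-- B replaces A's backward scan (with its nested backward inner scan) by one forward pass that
-- collects all maximal alphanumeric runs and then picks the rightmost run ending at or before
-- idx (objective: alternative decomposition; no speed claim).

-- ===== PORT A =====
-- l[i] for 0 ≤ i < len (every use below is in range, so getD is exact)
def chAt (l : List Char) (i : Nat) : Char := l.getD i ' '
-- line[a:b] for 0 ≤ a ≤ b ≤ len (every use below is in range, so take/drop is exact)
def pySlice (l : List Char) (a b : Nat) : String := String.ofList ((l.take b).drop a)

-- inner loop `for j in range(i-1, -1, -1)`; fuel = number of positions left, current j = fuel - 1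
def fpwInner (l : List Char) (e : Nat) : Nat → Int × Int × String
  | 0 => (0, (e : Int), pySlice l 0 e)              -- loop fell through: j reached -1
  | j + 1 =>
    let ch2 := chAt l j
    if PySem.Chars.isspace ch2 then (((j + 1 : Nat) : Int), (e : Int), pySlice l (j + 1) e)
    else if PySem.Chars.isalnum ch2 then fpwInner l e j
    else (((j + 1 : Nat) : Int), (e : Int), pySlice l (j + 1) e)

-- outer loop `for i in range(idx, -1, -1)` with the found_space flag; fuel = positions left
def fpwOuter (l : List Char) (fs : Bool) : Nat → Int × Int × String
  | 0 => (-1, -1, "")                               -- loop fell through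
  | i + 1 =>
    let ch := chAt l i
    if PySem.Chars.isspace ch then fpwOuter l true i
    else if PySem.Chars.isalnum ch then
      if fs then fpwInner l (i + 1) i else fpwOuter l fs i
    else fpwOuter l true i

def find_previous_word (line : String) (idx : Int) : Int × Int × String :=
  if idx < 0 ∨ (line.toList.length : Int) ≤ idx then (-1, -1, "")
  else fpwOuter line.toList false (idx.toNat + 1)

-- ===== PORT B =====
-- forward pass (position i, current run start st): all maximal alphanumeric runs (start, end_exclusive)
def fpwRuns (st : Option Nat) (i : Nat) : List Char → List (Nat × Nat)
  | [] => match st with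
    | none => []
    | some s => [(s, i)]
  | c :: cs =>
    if PySem.Chars.isalnum c then fpwRuns (some (st.getD i)) (i + 1) cs
    else match st with
      | none => fpwRuns none (i + 1) cs
      | some s => (s, i) :: fpwRuns none (i + 1) cs

def find_previous_word_alt (line : String) (idx : Int) : Int × Int × String :=
  if idx < 0 ∨ (line.toList.length : Int) ≤ idx then (-1, -1, "")
  else
    -- the previous word is the rightmost run whose end lies at or before idx
    match (fpwRuns none 0 line.toList).foldl
        (fun b r => if (r.2 : Int) ≤ idx then some r else b) (none : Option (Nat × Nat)) with
    | none => (-1, -1, "")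
    | some (s, e) => ((s : Int), (e : Int), pySlice line.toList s e)

-- ===== PRECONDITION & SPEC =====
def Spec_find_previous_word (line : String) (idx : Int) (out : Int × Int × String) : Prop := out = find_previous_word_alt line idx
instance (line : String) (idx : Int) (out : Int × Int × String) : Decidable (Spec_find_previous_word line idx out) := by unfold Spec_find_previous_word; infer_instance

-- ===== CLAIM (what is proved, stated in full; the proofs are below) =====
def Claim_equal_find_previous_word : Prop := ∀ (line : String) (idx : Int), Dom_find_previous_word line idx → Spec_find_previous_word line idx (find_previous_word line idx)

-- ===== LEMMAS AND PROOFS =====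

-- position i holds an alphanumeric character (out of range: default ' ', not alphanumeric)
def alB (l : List Char) (i : Nat) : Bool := PySem.Chars.isalnum (chAt l i)

-- start of the alphanumeric run reaching up to (excluding) position k: walk back while alnum
def wstart (l : List Char) : Nat → Nat
  | 0 => 0
  | k + 1 => if alB l k then wstart l k else k + 1

-- largest alphanumeric position below m
def lab (l : List Char) : Nat → Option Nat
  | 0 => none
  | m + 1 => if alB l m then some m else lab l m

-- largest position below m that is the last character of a maximal run
def labE (l : List Char) : Nat → Option Nat
  | 0 => none
  | m + 1 => if alB l m && !alB l (m + 1) then some m else labE l m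

-- B's answer, abstractly: the rightmost maximal run whose last character lies below m
def bestRun (l : List Char) (m : Nat) : Option (Nat × Nat) :=
  match labE l m with
  | none => none
  | some j => some (wstart l j, j + 1)

theorem ws_not_alnum (c : Char) (h : PySem.Chars.isspace c = true) : PySem.Chars.isalnum c = false := by
  have h0 : '0'.val.toNat = 48 := rfl
  have h9 : '9'.val.toNat = 57 := rfl
  have hA : 'A'.val.toNat = 65 := rfl
  have hZ : 'Z'.val.toNat = 90 := rfl
  have ha : 'a'.val.toNat = 97 := rfl
  have hz : 'z'.val.toNat = 122 := rfl
  simp only [PySem.Chars.isspace, PySem.Chars.isalnum, PySem.Chars.isalpha, PySem.Chars.isdigit,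
    PySem.Chars.isupper, PySem.Chars.islower,
    Bool.or_eq_true, Bool.and_eq_true, decide_eq_true_eq, Bool.or_eq_false_iff, Bool.and_eq_false_iff,
    decide_eq_false_iff_not, Char.le_def, Char.toNat, UInt32.le_iff_toNat_le, h0, h9, hA, hZ, ha, hz] at *
  omega

theorem fpwInner_eq (l : List Char) (e : Nat) : ∀ j,
    fpwInner l e j = ((wstart l j : Int), (e : Int), pySlice l (wstart l j) e) := by
  intro j
  induction j with
  | zero => simp [fpwInner, wstart]
  | succ j ih =>
    by_cases hal : PySem.Chars.isalnum (chAt l j) = true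
    · have hws : PySem.Chars.isspace (chAt l j) = false := by
        cases h : PySem.Chars.isspace (chAt l j)
        · rfl
        · rw [ws_not_alnum _ h] at hal; exact absurd hal (by simp)
      have hal' : alB l j = true := hal
      simp [fpwInner, hws, hal, wstart, hal', ih]
    · have hal' : alB l j = false := by simpa [alB] using hal
      by_cases hws : PySem.Chars.isspace (chAt l j) = true
      · simp [fpwInner, hws, wstart, hal']
      · simp [fpwInner, hws, hal, wstart, hal']
theorem fpwOuter_true_eq (l : List Char) : ∀ k,
    fpwOuter l true k = match lab l k with
      | none => (-1, -1, "")
      | some i => fpwInner l (i + 1) i := by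
  intro k
  induction k with
  | zero => simp [fpwOuter, lab]
  | succ k ih =>
    by_cases hal : PySem.Chars.isalnum (chAt l k) = true
    · have hws : PySem.Chars.isspace (chAt l k) = false := by
        cases h : PySem.Chars.isspace (chAt l k)
        · rfl
        · rw [ws_not_alnum _ h] at hal; exact absurd hal (by simp)
      have hal' : alB l k = true := hal
      simp [fpwOuter, hws, hal, lab, hal']
    · have hal' : alB l k = false := by simpa [alB] using hal
      by_cases hws : PySem.Chars.isspace (chAt l k) = true
      · simp [fpwOuter, hws, lab, hal', ih]
      · simp [fpwOuter, hws, hal, lab, hal', ih]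
theorem fpwOuter_false_eq (l : List Char) : ∀ k,
    fpwOuter l false k = fpwOuter l true (wstart l k) := by
  intro k
  induction k with
  | zero => simp [fpwOuter, wstart]
  | succ k ih =>
    by_cases hal : PySem.Chars.isalnum (chAt l k) = true
    · have hws : PySem.Chars.isspace (chAt l k) = false := by
        cases h : PySem.Chars.isspace (chAt l k)
        · rfl
        · rw [ws_not_alnum _ h] at hal; exact absurd hal (by simp)
      have hal' : alB l k = true := hal
      simp [fpwOuter, hws, hal, wstart, hal', ih]
    · have hal' : alB l k = false := by simpa [alB] using hal
      have hstep : fpwOuter l true (k + 1) = fpwOuter l true k := by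
        by_cases hws : PySem.Chars.isspace (chAt l k) = true
        · simp [fpwOuter, hws]
        · simp [fpwOuter, hws, hal]
      by_cases hws : PySem.Chars.isspace (chAt l k) = true
      · simp [fpwOuter, hws, wstart, hal', hstep]
      · simp [fpwOuter, hws, hal, wstart, hal', hstep]
theorem wstart_le (l : List Char) : ∀ k, wstart l k ≤ k := by
  intro k
  induction k with
  | zero => simp [wstart]
  | succ k ih => by_cases h : alB l k <;> simp [wstart, h] <;> omega
theorem wstart_alnum (l : List Char) : ∀ k j, wstart l k ≤ j → j < k → alB l j = true := by
  intro k
  induction k with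
  | zero => intro j _ h2; omega
  | succ k ih =>
    intro j h1 h2
    by_cases h : alB l k = true
    · rw [wstart, if_pos h] at h1
      rcases Nat.lt_or_ge j k with hj | hj
      · exact ih j h1 hj
      · have : j = k := by omega
        subst this; exact h
    · rw [wstart, if_neg h] at h1; omega
theorem wstart_boundary (l : List Char) : ∀ k, wstart l k = 0 ∨ alB l (wstart l k - 1) = false := by
  intro k
  induction k with
  | zero => left; rfl
  | succ k ih =>
    by_cases h : alB l k = true
    · rw [wstart, if_pos h]; exact ih
    · rw [wstart, if_neg h]; right; simpa using h
theorem wstart_run (l : List Char) (s : Nat) (hb : s = 0 ∨ alB l (s - 1) = false) :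
    ∀ k, s ≤ k → (∀ j, s ≤ j → j < k → alB l j = true) → wstart l k = s := by
  intro k
  induction k with
  | zero => intro h _; simp [wstart]; omega
  | succ k ih =>
    intro hs hall
    by_cases hsk : s = k + 1
    · subst hsk
      rcases hb with h0 | hf
      · omega
      · rw [wstart, if_neg (by simpa using hf)]
    · have hsk' : s ≤ k := by omega
      rw [wstart, if_pos (hall k hsk' (by omega))]
      exact ih hsk' (fun j h1 h2 => hall j h1 (by omega))
theorem labE_congr (l : List Char) (m1 : Nat) : ∀ m2, m1 ≤ m2 →
    (∀ j, m1 ≤ j → j < m2 → ¬(alB l j = true ∧ alB l (j + 1) = false)) →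
    labE l m2 = labE l m1 := by
  intro m2
  induction m2 with
  | zero => intro h _; have : m1 = 0 := by omega
            subst this; rfl
  | succ m ih =>
    intro h hno
    by_cases he : m1 = m + 1
    · subst he; rfl
    · have hm : m1 ≤ m := by omega
      have : ¬(alB l m = true ∧ alB l (m + 1) = false) := hno m hm (by omega)
      have hcond : (alB l m && !alB l (m + 1)) = false := by
        cases h1 : alB l m <;> cases h2 : alB l (m + 1) <;> simp_all
      rw [labE, hcond]
      · exact ih hm (fun j h1 h2 => hno j h1 (by omega))
theorem lab_none_iff (l : List Char) : ∀ w, lab l w = none ↔ ∀ j, j < w → alB l j = false := by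
  intro w
  induction w with
  | zero => simp [lab]
  | succ w ih =>
    by_cases h : alB l w = true
    · simp only [lab, h, if_true]
      constructor
      · intro hc; exact absurd hc (by simp)
      · intro hall; exact absurd (hall w (by omega)) (by simp [h])
    · simp only [lab, h]
      rw [if_neg (by simp [h]), ih]
      constructor
      · intro hall j hj
        rcases Nat.lt_or_ge j w with h1 | h1
        · exact hall j h1
        · have : j = w := by omega
          subst this; simpa using h
      · intro hall j hj; exact hall j (by omega)
theorem lab_some (l : List Char) : ∀ w j, lab l w = some j →
    j < w ∧ alB l j = true ∧ ∀ j', j < j' → j' < w → alB l j' = false := by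
  intro w
  induction w with
  | zero => intro j h; simp [lab] at h
  | succ w ih =>
    intro j h
    by_cases hw : alB l w = true
    · rw [lab, if_pos hw] at h
      have : j = w := by simpa using h.symm
      subst this
      exact ⟨by omega, hw, fun j' h1 h2 => by omega⟩
    · rw [lab, if_neg hw] at h
      obtain ⟨h1, h2, h3⟩ := ih j h
      refine ⟨by omega, h2, fun j' hj1 hj2 => ?_⟩
      rcases Nat.lt_or_ge j' w with hh | hh
      · exact h3 j' hj1 hh
      · have : j' = w := by omega
        subst this; simpa using hw
theorem labE_eq_none_of (l : List Char) : ∀ w, (∀ j, j < w → alB l j = false) → labE l w = none := by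
  intro w
  induction w with
  | zero => intro _; rfl
  | succ w ih =>
    intro hall
    rw [labE, if_neg (by simp [hall w (by omega)])]
    exact ih (fun j hj => hall j (by omega))
theorem labE_eq_some_of (l : List Char) : ∀ w j, j < w → alB l j = true → alB l (j + 1) = false →
    (∀ j', j < j' → j' < w → ¬(alB l j' = true ∧ alB l (j' + 1) = false)) →
    labE l w = some j := by
  intro w
  induction w with
  | zero => intro j h; omega
  | succ w ih =>
    intro j hj h1 h2 hno
    by_cases hjw : j = w
    · subst hjw
      rw [labE, if_pos (by simp [h1, h2])]
    · have hjw' : j < w := by omega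
      have hcond : (alB l w && !alB l (w + 1)) = false := by
        have := hno w (by omega) (by omega)
        cases ha : alB l w <;> cases hb : alB l (w + 1) <;> simp_all
      rw [labE, hcond]
      · exact ih j hjw' h1 h2 (fun j' a b => hno j' a (by omega))
theorem lab_eq_labE (l : List Char) (w : Nat)
    (hb : alB l w = false ∨ w = 0 ∨ alB l (w - 1) = false) : lab l w = labE l w := by
  cases h : lab l w with
  | none =>
    rw [labE_eq_none_of l w ((lab_none_iff l w).mp h)]
  | some j =>
    obtain ⟨h1, h2, h3⟩ := lab_some l w j h
    have hnext : alB l (j + 1) = false := by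
      rcases Nat.lt_or_ge (j + 1) w with hh | hh
      · exact h3 (j + 1) (by omega) hh
      · have : j + 1 = w := by omega
        rcases hb with hc | hc | hc
        · rw [this]; exact hc
        · omega
        · have : j = w - 1 := by omega
          rw [this] at h2; simp [h2] at hc
    rw [labE_eq_some_of l w j h1 h2 hnext
      (fun j' a b hcontra => by simp [h3 j' a b] at hcontra)]
theorem bestRun_congr (l : List Char) (m1 m2 : Nat) (h : m1 ≤ m2)
    (hno : ∀ j, m1 ≤ j → j < m2 → ¬(alB l j = true ∧ alB l (j + 1) = false)) :
    bestRun l m2 = bestRun l m1 := by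
  unfold bestRun; rw [labE_congr l m1 m2 h hno]
theorem bestRun_min_congr (l : List Char) (k a b : Nat) (hab : a ≤ b)
    (hno : ∀ j, a ≤ j → j < b → ¬(alB l j = true ∧ alB l (j + 1) = false)) :
    bestRun l (min b k) = bestRun l (min a k) := by
  apply bestRun_congr _ _ _ (by omega)
  intro j h1 h2
  exact hno j (by omega) (by omega)
theorem fpwRuns_cons_alnum (st : Option Nat) (i : Nat) (c : Char) (cs : List Char)
    (h : PySem.Chars.isalnum c = true) :
    fpwRuns st i (c :: cs) = fpwRuns (some (st.getD i)) (i + 1) cs := by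
  simp [fpwRuns, h]
theorem fpwRuns_cons_none (i : Nat) (c : Char) (cs : List Char)
    (h : ¬ PySem.Chars.isalnum c = true) :
    fpwRuns none i (c :: cs) = fpwRuns none (i + 1) cs := by
  simp [fpwRuns, h]
theorem fpwRuns_cons_some (s i : Nat) (c : Char) (cs : List Char)
    (h : ¬ PySem.Chars.isalnum c = true) :
    fpwRuns (some s) i (c :: cs) = (s, i) :: fpwRuns none (i + 1) cs := by
  simp [fpwRuns, h]
theorem fpwRuns_fold (l : List Char) (k : Nat) (hk : k < l.length) :
    ∀ rest i st b0, rest = l.drop i →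
    (match st with
     | none => (i = 0 ∨ alB l (i - 1) = false) ∧ b0 = bestRun l (min (i - 1) k)
     | some s => s < i ∧ (s = 0 ∨ alB l (s - 1) = false) ∧
         (∀ j, s ≤ j → j < i → alB l j = true) ∧ b0 = bestRun l (min s k)) →
    (fpwRuns st i rest).foldl (fun b r => if (r.2 : Int) ≤ (k : Int) then some r else b) b0
      = bestRun l k := by
  intro rest
  induction rest with
  | nil =>
    intro i st b0 hdrop hinv
    have hlen : l.length ≤ i := by
      have := congrArg List.length hdrop
      simp at this; omega
    match st with
    | none =>
      obtain ⟨hb, hb0⟩ := hinv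
      have : min (i - 1) k = k := by omega
      rw [this] at hb0
      simpa [fpwRuns] using hb0
    | some s =>
      obtain ⟨hsi, hbd, hall, hb0⟩ := hinv
      have hcond : ¬ ((i : Int) ≤ (k : Int)) := by exact_mod_cast (by omega : ¬ (i ≤ k))
      simp only [fpwRuns, List.foldl_cons, List.foldl_nil, if_neg hcond]
      rw [hb0]
      rcases Nat.lt_or_ge s k with hks | hks
      · have h2 := bestRun_min_congr l k s k (by omega)
          (fun j h1 h2 => by simp [hall j h1 (by omega), hall (j + 1) (by omega) (by omega)])
        rw [show min s k = s by omega, show min k k = k by omega] at h2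
        rw [show min s k = s by omega]
        exact h2.symm
      · congr 1; omega
  | cons c cs ih =>
    intro i st b0 hdrop hinv
    have hi : i < l.length := by
      have := congrArg List.length hdrop
      simp at this; omega
    have hc : chAt l i = c := by
      have h0 : l[i]? = some c := by
        have : (l.drop i)[0]? = some c := by rw [← hdrop]; rfl
        simpa using this
      simp [chAt, List.getD, h0]
    have hcs : cs = l.drop (i + 1) := by
      have : (l.drop i).drop 1 = l.drop (i + 1) := by
        rw [List.drop_drop]
      rw [← this, ← hdrop]; rfl
    by_cases hal : PySem.Chars.isalnum c = true
    · have halB : alB l i = true := by rw [alB, hc]; exact hal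
      match st with
      | none =>
        obtain ⟨hb, hb0⟩ := hinv
        rw [fpwRuns_cons_alnum _ _ _ _ hal]
        apply ih (i + 1) (some i) b0 hcs
        refine ⟨by omega, by simpa using hb, ?_, ?_⟩
        · intro j h1 h2
          have : j = i := by omega
          subst this; exact halB
        · rw [hb0]
          rcases Nat.eq_or_lt_of_le (Nat.zero_le i) with h0 | h0
          · rw [← h0]
          · rcases hb with h | h
            · omega
            · exact (bestRun_min_congr l k (i - 1) i (by omega)
                (fun j h1 h2 => by
                  have : j = i - 1 := by omega
                  subst this; simp [h])).symm
      | some s =>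
        obtain ⟨hsi, hbd, hall, hb0⟩ := hinv
        rw [fpwRuns_cons_alnum _ _ _ _ hal]
        apply ih (i + 1) (some s) b0 hcs
        refine ⟨by omega, hbd, ?_, hb0⟩
        intro j h1 h2
        rcases Nat.lt_or_ge j i with hj | hj
        · exact hall j h1 hj
        · have : j = i := by omega
          subst this; exact halB
    · have halB : alB l i = false := by rw [alB, hc]; simpa using hal
      match st with
      | none =>
        obtain ⟨hb, hb0⟩ := hinv
        rw [fpwRuns_cons_none _ _ _ hal]
        apply ih (i + 1) none b0 hcs
        refine ⟨Or.inr (by simpa using halB), ?_⟩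
        rw [hb0]
        rcases hb with h | h
        · subst h; rfl
        · exact (bestRun_min_congr l k (i - 1) i (by omega)
            (fun j h1 h2 => by
              have : j = i - 1 := by omega
              subst this; simp [h])).symm
      | some s =>
        obtain ⟨hsi, hbd, hall, hb0⟩ := hinv
        rw [fpwRuns_cons_some _ _ _ _ hal, List.foldl_cons]
        apply ih (i + 1) none _ hcs
        refine ⟨Or.inr (by simpa using halB), ?_⟩
        rw [show (i + 1 - 1 : Nat) = i by omega]
        by_cases hik : i ≤ k
        · rw [if_pos (by exact_mod_cast hik)]
          rw [show min i k = i by omega]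
          have hlabE : labE l i = some (i - 1) := by
            apply labE_eq_some_of l i (i - 1) (by omega)
              (hall (i - 1) (by omega) (by omega))
              (by rw [show (i - 1 + 1 : Nat) = i by omega]; exact halB)
            intro j' h1 h2; omega
          have hws : wstart l (i - 1) = s :=
            wstart_run l s hbd (i - 1) (by omega) (fun j h1 h2 => hall j h1 (by omega))
          simp only [bestRun, hlabE, hws, show (i - 1 + 1 : Nat) = i by omega]
        · rw [if_neg (by exact_mod_cast hik)]
          rw [hb0, show min i k = k by omega]
          rcases Nat.lt_or_ge s k with hks | hks
          · have h2 := bestRun_min_congr l k s k (by omega)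
              (fun j h1 h2 => by
                simp [hall j h1 (by omega), hall (j + 1) (by omega) (by omega)])
            rw [show min s k = s by omega, show min k k = k by omega] at h2
            rw [show min s k = s by omega]
            exact h2.symm
          · congr 1; omega

-- the boundary A effectively scans back from equals B's cut at idx
theorem lab_wstart_eq_labE (l : List Char) (k : Nat) (hk : k < l.length) :
    lab l (wstart l (k + 1)) = labE l k := by
  by_cases hak : alB l k = true
  · rw [wstart, if_pos hak]
    rw [lab_eq_labE l (wstart l k) (Or.inr (wstart_boundary l k))]
    rw [labE_congr l (wstart l k) k (wstart_le l k)]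
    intro j h1 h2 hcon
    rcases Nat.lt_or_ge (j + 1) k with hh | hh
    · exact absurd (wstart_alnum l k (j + 1) (by omega) hh) (by simp [hcon.2])
    · have : j + 1 = k := by omega
      rw [this] at hcon
      simp [hak] at hcon
  · rw [wstart, if_neg hak, lab, if_neg hak]
    exact lab_eq_labE l k (Or.inl (by simpa using hak))

-- ===== VERDICT (by name: the statement is the Claim_ definition above) =====
theorem find_previous_word_spec : Claim_equal_find_previous_word := by
  intro line idx _
  unfold Spec_find_previous_word find_previous_word find_previous_word_alt
  by_cases hg : idx < 0 ∨ (line.toList.length : Int) ≤ idx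
  · rw [if_pos hg, if_pos hg]
  · push Not at hg
    obtain ⟨h0, h1⟩ := hg
    obtain ⟨k, rfl⟩ := Int.eq_ofNat_of_zero_le (by omega : (0 : Int) ≤ idx)
    have hk : k < line.toList.length := by exact_mod_cast h1
    rw [if_neg (by push Not; exact ⟨h0, h1⟩), if_neg (by push Not; exact ⟨h0, h1⟩)]
    rw [show ((k : Int).toNat + 1) = k + 1 by simp]
    rw [fpwOuter_false_eq, fpwOuter_true_eq, lab_wstart_eq_labE _ _ hk]
    rw [fpwRuns_fold line.toList k hk line.toList 0 none none rfl
      ⟨Or.inl rfl, by simp [bestRun, labE]⟩]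
    cases h : labE line.toList k with
    | none => simp [bestRun, h]
    | some j => simp [bestRun, h, fpwInner_eq]
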